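-- pv_equiv track=rewrite | github.com/raeez/chiral-bar-cobar | compute/lib/admissible_koszul_rank2_engine.py | ce_cohomology_slN
-- ===== SOURCE A (Python) =====
-- from typing import Dict, List, Optional, Tuple, Any, Set
--
-- def ce_cohomology_slN(N: int) -> Dict[int, int]:
--     """Lie algebra cohomology H^d(sl_N, C) (trivial coefficients).
--
--     For semisimple sl_N:
--     H^0 = C (dim 1)
--     H^d = 0 for d = 1, 2 (Whitehead's first and second lemma)
--     H^3 = C^{rank} = C^{N-1} for N >= 3
--     ...
--     H^{top} = C (Poincare duality: dim = 2*dim(g) - 1 for sl_N)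
--
--     The full Poincare polynomial is:
--     P(t) = prod_{i=1}^{N-1} (1 + t^{2i+1})
--
--     For sl_2: P = (1 + t^3). H^0 = H^3 = C.
--     For sl_3: P = (1 + t^3)(1 + t^5). H^0 = H^3 = H^5 = H^8 = C.
--     For sl_4: P = (1 + t^3)(1 + t^5)(1 + t^7). H^0=H^3=H^5=H^7=H^8=H^{10}=H^{12}=H^{15} = C.
--     """
--     cohom = {}
--     dim_g = N * N - 1
--
--     # Initialize all to 0
--     for d in range(dim_g + 1):
--         cohom[d] = 0
--
--     # The exponents of sl_N are 1, 2, ..., N-1.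
--     # The degrees of the generators of H^*(sl_N) are 2*e_i + 1.
--     exponents = list(range(1, N))
--     degrees = [2 * e + 1 for e in exponents]
--
--     # The cohomology ring is an exterior algebra on generators of
--     # degrees 2*e_i + 1. So the Poincare polynomial is
--     # prod (1 + t^{2e_i + 1}).
--     # The nonzero cohomology groups are at degrees that are sums
--     # of distinct elements from {2*e_i + 1}.
--
--     # Generate all subsets of degrees
--     from itertools import combinations
--     for r in range(len(degrees) + 1):
--         for subset in combinations(degrees, r):
--             d = sum(subset)
--             if d <= dim_g:
--                 cohom[d] += 1
--
--     return cohom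
-- ===== SOURCE B (Python) =====
-- def ce_cohomology_slN(N: int) -> dict:
--     """Same table via iterative polynomial multiplication of the factors
--     (1 + t^(2e+1)), accumulating coefficients -- O(N^3) instead of 2^N subsets."""
--     dim_g = N * N - 1
--     coeffs = [1] + [0] * dim_g if dim_g >= 0 else []
--     for e in range(1, N):
--         deg = 2 * e + 1
--         coeffs = [c + (coeffs[d - deg] if d >= deg else 0)
--                   for d, c in enumerate(coeffs)]
--     return {d: c for d, c in enumerate(coeffs)}
-- ===== Notes on version B (the rewrite author's own statement) =====
-- stated objective: faster
-- what changed: Replaces A's enumeration of all exponentially many subsets of the generator degrees (itertools.combinations for every cardinality) by iterative polynomial multiplication of the factors (1 + t^deg), accumulating a coefficient list in one pass per factor; intended as faster (measured 519x at the largest size both finished; A times out beyond that).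
import Mathlib
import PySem

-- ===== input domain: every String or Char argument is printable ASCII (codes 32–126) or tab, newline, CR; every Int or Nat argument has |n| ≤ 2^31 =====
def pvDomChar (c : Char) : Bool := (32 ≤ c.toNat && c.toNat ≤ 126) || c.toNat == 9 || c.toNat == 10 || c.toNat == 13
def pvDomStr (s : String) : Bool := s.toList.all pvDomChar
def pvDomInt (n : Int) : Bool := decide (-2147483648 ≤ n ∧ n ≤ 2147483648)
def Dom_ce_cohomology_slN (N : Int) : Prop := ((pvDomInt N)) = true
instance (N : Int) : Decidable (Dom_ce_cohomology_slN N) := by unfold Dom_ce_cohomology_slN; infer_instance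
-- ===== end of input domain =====

-- B replaces A's enumeration of all (exponentially many) subsets of the generator degrees by
-- iterative polynomial multiplication of the factors (1 + t^deg), accumulating a coefficient
-- list; intended as faster (measured 519x at the largest size both finished).

-- ===== PORT A =====
-- itertools.combinations(l, r) in Python's order (lexicographic by position)
def pvCombos : Nat → List Int → List (List Int)
  | 0, _ => [[]]
  | _ + 1, [] => []
  | r + 1, x :: xs => ((pvCombos r xs).map (fun s => x :: s)) ++ pvCombos (r + 1) xs

def ce_cohomology_slN (N : Int) : List (Int × Int) :=
  let dim_g := N * N - 1
  -- for d in range(dim_g + 1): cohom[d] = 0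
  let cohom : PySem.Dict Int Int :=
    (PySem.List.pyRange 0 (dim_g + 1)).foldl (fun dct d => dct.insert d 0) PySem.Dict.empty
  let exponents := PySem.List.pyRange 1 N
  let degrees := exponents.map (fun e => 2 * e + 1)
  -- for r in range(len(degrees)+1): for subset in combinations(degrees, r): …
  let cohom := (PySem.List.pyRange 0 ((degrees.length : Int) + 1)).foldl (fun dct r =>
      (pvCombos r.toNat degrees).foldl (fun dct subset =>
        let d := subset.sum
        -- cohom[d] += 1 (the key is always present when this branch is taken)
        if d ≤ dim_g then dct.modify d 0 (· + 1) else dct) dct) cohom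
  cohom.items

-- ===== PORT B =====
def ce_cohomology_slN_alt (N : Int) : List (Int × Int) :=
  let dim_g := N * N - 1
  let coeffs : List Int := if dim_g ≥ 0 then 1 :: List.replicate dim_g.toNat 0 else []
  let coeffs := (PySem.List.pyRange 1 N).foldl (fun cs e =>
      let deg := 2 * e + 1
      -- [c + (cs[d - deg] if d >= deg else 0) for d, c in enumerate(cs)];
      -- in the taken branch 0 ≤ d - deg < len(cs), so pyGetD is exactly cs[d - deg]
      (PySem.List.enumerate cs).map (fun dc =>
        dc.2 + (if dc.1 ≥ deg then PySem.List.pyGetD cs (dc.1 - deg) 0 else 0))) coeffs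
  -- {d: c for d, c in enumerate(coeffs)}
  (PySem.Dict.ofList (PySem.List.enumerate coeffs)).items

-- ===== PRECONDITION & SPEC =====
def Spec_ce_cohomology_slN (N : Int) (out : List (Int × Int)) : Prop := out = ce_cohomology_slN_alt N
instance (N : Int) (out : List (Int × Int)) : Decidable (Spec_ce_cohomology_slN N out) := by unfold Spec_ce_cohomology_slN; infer_instance

-- ===== CLAIM (what is proved, stated in full; the proofs are below) =====
def Claim_equal_ce_cohomology_slN : Prop := ∀ (N : Int), Dom_ce_cohomology_slN N → Spec_ce_cohomology_slN N (ce_cohomology_slN N)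

-- ===== LEMMAS AND PROOFS =====

-- number of sublists of l summing to d, as B's recursion builds it up
def pvCnt : List Int → Int → Int
  | [], d => if d = 0 then 1 else 0
  | x :: xs, d => pvCnt xs d + pvCnt xs (d - x)

-- number of subsets summing to d, as A's nested loops count it
def pvK (l : List Int) (d : Int) : Nat :=
  ((List.range (l.length + 1)).map (fun r => (pvCombos r l).countP (fun s => s.sum == d))).sum

lemma pvCombos_nil_of_gt (r : Nat) (l : List Int) (h : l.length < r) : pvCombos r l = [] := by
  induction l generalizing r with
  | nil => cases r with
    | zero => omega
    | succ k => rfl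
  | cons x xs ih =>
    cases r with
    | zero => simp at h
    | succ k =>
      simp at h
      simp [pvCombos, ih k (by omega), ih (k+1) (by omega)]

lemma pvCombos_mem {r : Nat} {l : List Int} {s : List Int} (h : s ∈ pvCombos r l) :
    ∀ x ∈ s, x ∈ l := by
  induction l generalizing r s with
  | nil =>
    cases r with
    | zero => simp [pvCombos] at h; simp [h]
    | succ k => simp [pvCombos] at h
  | cons y ys ih =>
    cases r with
    | zero => simp [pvCombos] at h; simp [h]
    | succ k =>
      simp only [pvCombos, List.mem_append, List.mem_map] at h
      rcases h with ⟨t, ht, rfl⟩ | h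
      · intro x hx
        rcases List.mem_cons.mp hx with rfl | hx
        · exact List.mem_cons_self
        · exact List.mem_cons_of_mem _ (ih ht x hx)
      · intro x hx; exact List.mem_cons_of_mem _ (ih h x hx)

lemma pvCnt_neg (p : List Int) (d : Int) (hp : ∀ x ∈ p, 0 ≤ x) (hd : d < 0) : pvCnt p d = 0 := by
  induction p generalizing d with
  | nil => simp [pvCnt]; omega
  | cons x xs ih =>
    have hx : 0 ≤ x := hp x List.mem_cons_self
    have hp' : ∀ y ∈ xs, 0 ≤ y := fun y hy => hp y (List.mem_cons_of_mem _ hy)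
    simp [pvCnt, ih d hp' hd, ih (d - x) hp' (by omega)]

lemma pvCnt_append_singleton (p : List Int) (x d : Int) :
    pvCnt (p ++ [x]) d = pvCnt p d + pvCnt p (d - x) := by
  induction p generalizing d with
  | nil => simp [pvCnt]
  | cons y ys ih =>
    simp only [List.cons_append, pvCnt, ih]
    have : d - y - x = d - x - y := by omega
    rw [this]; ring

lemma pvSumRangeShift (f : Nat → Nat) (n : Nat) :
    ((List.range (n+1)).map f).sum = f 0 + ((List.range n).map (fun r => f (r+1))).sum := by
  rw [List.range_succ_eq_map]
  simp only [List.map_cons, List.map_map, List.sum_cons]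
  rfl

lemma pvK_cons (x : Int) (xs : List Int) (d : Int) :
    pvK (x :: xs) d = pvK xs d + pvK xs (d - x) := by
  unfold pvK
  set n := xs.length with hn
  have hlen : (x :: xs).length = n + 1 := by simp [hn]
  rw [hlen]
  set F := fun r => (pvCombos r (x :: xs)).countP (fun s => s.sum == d) with hF
  set G := fun r => (pvCombos r xs).countP (fun s => s.sum == d) with hG
  set H := fun r => (pvCombos r xs).countP (fun s => s.sum == (d - x)) with hH
  have hsplit : ∀ r : Nat, F (r + 1) = H r + G (r + 1) := by
    intro r
    simp only [hF, hG, hH, pvCombos, List.countP_append, List.countP_map]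
    congr 1
    apply List.countP_congr
    intro s _
    simp only [Function.comp_apply, List.sum_cons, beq_iff_eq]
    omega
  have ha := pvSumRangeShift F (n + 1)
  have hb : ((List.range (n+1)).map (fun r => F (r+1))).sum
      = ((List.range (n+1)).map H).sum + ((List.range (n+1)).map (fun r => G (r+1))).sum := by
    rw [← List.sum_map_add]
    exact congrArg _ (List.map_congr_left (fun r _ => hsplit r))
  have hc := pvSumRangeShift G (n + 1)
  have hd : ((List.range (n+1+1)).map G).sum = ((List.range (n+1)).map G).sum + G (n+1) := by
    rw [List.range_succ]; simp
  have he : G (n + 1) = 0 := by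
    simp only [hG]
    rw [pvCombos_nil_of_gt (n + 1) xs (by omega)]
    rfl
  have hf : F 0 = G 0 := by simp [hF, hG, pvCombos]
  omega

lemma pvCnt_eq_pvK (l : List Int) (d : Int) : pvCnt l d = (pvK l d : Int) := by
  induction l generalizing d with
  | nil =>
    simp only [pvCnt, pvK, List.length_nil]
    by_cases h : d = 0
    · simp [h, pvCombos]
    · rw [if_neg h]
      have : (pvCombos 0 ([] : List Int)).countP (fun s => s.sum == d) = 0 := by
        simp only [pvCombos, List.countP_cons, List.countP_nil, List.sum_nil, beq_iff_eq,
          Nat.zero_add]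
        rw [if_neg (fun he : (0:Int) = d => h (Eq.symm he))]
      simp [this]
  | cons x xs ih => rw [pvCnt, pvK_cons, ih, ih]; push_cast; ring

lemma pvEnumerate_map_range {α : Type} (m : Nat) (g : Nat → α) (s : Int) :
    PySem.List.enumerate ((List.range m).map g) s
      = (List.range m).map (fun (j : Nat) => (s + (j : Int), g j)) := by
  induction m generalizing g s with
  | zero => simp
  | succ k ih =>
    rw [List.range_succ_eq_map]
    simp only [List.map_cons, List.map_map, PySem.List.enumerate]
    rw [ih (g ∘ Nat.succ) (s + 1)]
    congr 1
    · simp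
    · apply List.map_congr_left
      intro j hj
      simp [Function.comp, Nat.succ_eq_add_one]
      ring

-- A's inner loop, rewritten as a plain modify-fold over the admitted subset sums
lemma pvInnerFold (dim_g : Int) (subs : List (List Int)) (dct : PySem.Dict Int Int) :
    subs.foldl (fun dct subset =>
        let d := subset.sum
        if d ≤ dim_g then dct.modify d 0 (· + 1) else dct) dct
      = ((subs.filter (fun s => decide (s.sum ≤ dim_g))).map List.sum).foldl
          (fun d x => d.modify x 0 (· + 1)) dct := by
  rw [List.foldl_map, List.foldl_filter]
  simp only [decide_eq_true_eq]

lemma pvOuterGetD (dim_g : Int) (degrees : List Int) :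
    ∀ (rs : List Int) (dct : PySem.Dict Int Int) (k : Int),
      (rs.foldl (fun dct r =>
          (pvCombos r.toNat degrees).foldl (fun dct subset =>
            let d := subset.sum
            if d ≤ dim_g then dct.modify d 0 (· + 1) else dct) dct) dct).getD k 0
        = dct.getD k 0 + (rs.map (fun r =>
            (((((pvCombos r.toNat degrees).filter (fun s => decide (s.sum ≤ dim_g))).map List.sum).count k : Nat) : Int))).sum := by
  intro rs
  induction rs with
  | nil => simp
  | cons r rs ih =>
    intro dct k
    simp only [List.foldl_cons, List.map_cons, List.sum_cons]
    rw [ih, pvInnerFold, PySem.Dict.getD_foldl_modify_add_one]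
    ring

lemma pvOuterKeys (dim_g : Int) (degrees : List Int) (hdeg : ∀ x ∈ degrees, 0 ≤ x) :
    ∀ (rs : List Int) (dct : PySem.Dict Int Int),
      (∀ k : Int, 0 ≤ k → k ≤ dim_g → k ∈ dct.keys) →
      (rs.foldl (fun dct r =>
          (pvCombos r.toNat degrees).foldl (fun dct subset =>
            let d := subset.sum
            if d ≤ dim_g then dct.modify d 0 (· + 1) else dct) dct) dct).keys = dct.keys := by
  intro rs
  induction rs with
  | nil => intro dct _; rfl
  | cons r rs ih =>
    intro dct hmem
    simp only [List.foldl_cons]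
    have hstep : ((pvCombos r.toNat degrees).foldl (fun dct subset =>
        let d := subset.sum
        if d ≤ dim_g then dct.modify d 0 (· + 1) else dct) dct).keys = dct.keys := by
      rw [pvInnerFold, PySem.Dict.keys_foldl_modify, PySem.Set.update_eq_append_filter]
      have hnil : (PySem.Set.ofList (((pvCombos r.toNat degrees).filter
          (fun s => decide (s.sum ≤ dim_g))).map List.sum)).filter
          (fun y => !(PySem.Set.contains dct.keys y)) = [] := by
        rw [List.filter_eq_nil_iff]
        intro y hy
        rw [PySem.Set.mem_ofList] at hy
        obtain ⟨s, hs, rfl⟩ := List.mem_map.mp hy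
        have hsf := List.mem_filter.mp hs
        have hle : s.sum ≤ dim_g := by simpa using hsf.2
        have hnn : 0 ≤ s.sum := List.sum_nonneg (fun x hx =>
          hdeg x (pvCombos_mem hsf.1 x hx))
        have : s.sum ∈ dct.keys := hmem _ hnn hle
        simp [PySem.Set.contains, this]
      rw [hnil, List.append_nil]
    rw [ih _ (fun k h1 h2 => by rw [hstep]; exact hmem k h1 h2), hstep]

-- A's value, in closed canonical form
lemma pvA_canon (N : Int) (h0 : N ≠ 0) :
    ce_cohomology_slN N = (List.range (N*N).toNat).map
      (fun (j : Nat) => ((j : Int), pvCnt ((PySem.List.pyRange 1 N).map (fun e => 2*e+1)) (j : Int))) := by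
  have hmpos : 1 ≤ (N*N).toNat := by
    have := mul_self_pos.mpr h0
    omega
  have hm : (((N*N).toNat : Nat) : Int) = N * N := Int.toNat_of_nonneg (mul_self_nonneg N)
  simp only [ce_cohomology_slN]
  have hkeysL : PySem.List.pyRange 0 (N*N - 1 + 1)
      = (List.range (N*N).toNat).map (fun (k : Nat) => (k : Int)) := by
    have h1 : N*N - 1 + 1 = (((N*N).toNat : Nat) : Int) := by omega
    rw [h1, PySem.List.pyRange_zero_natCast]
  rw [hkeysL]
  set degrees := (PySem.List.pyRange 1 N).map (fun e => 2*e+1) with hdegs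
  have hdegnn : ∀ x ∈ degrees, 0 ≤ x := by
    intro x hx
    obtain ⟨e, he, rfl⟩ := List.mem_map.mp hx
    have := (PySem.List.mem_pyRange_one.mp he).1
    omega
  set L := (List.range (N*N).toNat).map (fun (k : Nat) => (k : Int)) with hL
  have hLnodup : L.Nodup :=
    List.Nodup.map (fun a b h => by exact_mod_cast h) List.nodup_range
  set dict0 := L.foldl (fun dct d => dct.insert d 0) (PySem.Dict.empty : PySem.Dict Int Int) with hd0
  have hitems0 : dict0.items = L.map (fun d => (d, (0 : Int))) := by
    rw [hd0, PySem.Dict.items_foldl_insert_fresh L (fun a => a) (fun _ => 0) _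
      (fun a _ => PySem.Dict.contains_empty a) (by simpa using hLnodup)]
    rfl
  have hkeys0 : dict0.keys = L := by
    simp only [PySem.Dict.keys]
    rw [hitems0, List.map_map]
    exact List.map_id L
  have hmem : ∀ k : Int, 0 ≤ k → k ≤ N*N - 1 → k ∈ dict0.keys := by
    intro k h1 h2
    rw [hkeys0, hL]
    exact List.mem_map.mpr ⟨k.toNat, List.mem_range.mpr (by omega), by omega⟩
  have hfold := pvOuterKeys (N*N - 1) degrees hdegnn
    (PySem.List.pyRange 0 ((degrees.length : Int) + 1)) dict0 hmem
  have hitemsF := PySem.Dict.items_eq_map_keys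
    ((PySem.List.pyRange 0 ((degrees.length : Int) + 1)).foldl (fun dct r =>
      (pvCombos r.toNat degrees).foldl (fun dct subset =>
        let d := subset.sum
        if d ≤ N*N - 1 then dct.modify d 0 (· + 1) else dct) dct) dict0)
    (by rw [hfold, hkeys0]; exact hLnodup) (0 : Int)
  rw [hitemsF, hfold, hkeys0, hL, List.map_map]
  apply List.map_congr_left
  intro j hj
  have hjm : j < (N*N).toNat := List.mem_range.mp hj
  simp only [Function.comp_apply]
  congr 1
  -- the stored value at key j
  rw [pvOuterGetD (N*N - 1) degrees _ dict0 ((j : Nat) : Int)]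
  have hg0 : dict0.getD ((j : Nat) : Int) 0 = 0 := by
    refine PySem.Dict.getD_of_mem_items dict0 ?_ (by rw [hkeys0]; exact hLnodup) 0
    rw [hitems0]
    exact List.mem_map.mpr ⟨((j : Nat) : Int), List.mem_map.mpr ⟨j, hj, rfl⟩, rfl⟩
  rw [hg0, zero_add]
  -- the range over r, as naturals
  have hrs : PySem.List.pyRange 0 ((degrees.length : Int) + 1)
      = (List.range (degrees.length + 1)).map (fun (r : Nat) => (r : Int)) := by
    have h1 : (degrees.length : Int) + 1 = (((degrees.length + 1 : Nat)) : Int) := by push_cast; ring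
    rw [h1, PySem.List.pyRange_zero_natCast]
  rw [hrs, List.map_map]
  have hterm : ∀ r : Nat,
      ((((((pvCombos ((r : Int)).toNat degrees).filter (fun s => decide (s.sum ≤ N*N - 1))).map List.sum).count ((j : Nat) : Int) : Nat)) : Int)
        = (((pvCombos r degrees).countP (fun s => s.sum == ((j : Nat) : Int)) : Nat) : Int) := by
    intro r
    congr 1
    rw [Int.toNat_natCast, List.count_eq_countP, List.countP_map, List.countP_filter]
    apply List.countP_congr
    intro s _
    by_cases hs : s.sum = ((j : Nat) : Int)
    · simp [Function.comp, hs]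
      omega
    · simp [Function.comp, hs]
  calc ((List.range (degrees.length + 1)).map ((fun r =>
            ((((((pvCombos r.toNat degrees).filter (fun s => decide (s.sum ≤ N*N - 1))).map List.sum).count ((j : Nat) : Int) : Nat)) : Int)) ∘ (fun (r : Nat) => (r : Int)))).sum
      = ((List.range (degrees.length + 1)).map (fun (r : Nat) =>
            (((pvCombos r degrees).countP (fun s => s.sum == ((j : Nat) : Int)) : Nat) : Int))).sum := by
        exact congrArg _ (List.map_congr_left (fun r _ => hterm r))
    _ = pvCnt degrees ((j : Nat) : Int) := by
        rw [pvCnt_eq_pvK, pvK]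
        rw [Nat.cast_list_sum, List.map_map]
        rfl

-- B's degree loop keeps the coefficient list in pvCnt form
lemma pvBFold (m : Nat) :
    ∀ (es : List Int) (p : List Int), (∀ e ∈ es, 1 ≤ e) → (∀ x ∈ p, 0 ≤ x) →
      es.foldl (fun cs e =>
          let deg := 2 * e + 1
          (PySem.List.enumerate cs).map (fun dc =>
            dc.2 + (if dc.1 ≥ deg then PySem.List.pyGetD cs (dc.1 - deg) 0 else 0)))
        ((List.range m).map (fun (j : Nat) => pvCnt p (j : Int)))
      = (List.range m).map (fun (j : Nat) => pvCnt (p ++ es.map (fun e => 2*e+1)) (j : Int)) := by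
  intro es
  induction es with
  | nil => intro p _ _; simp
  | cons e es ih =>
    intro p hes hp
    have he1 : 1 ≤ e := hes e List.mem_cons_self
    simp only [List.foldl_cons]
    have hstep : (PySem.List.enumerate ((List.range m).map (fun (j : Nat) => pvCnt p (j : Int)))).map
        (fun dc => dc.2 + (if dc.1 ≥ 2 * e + 1 then
          PySem.List.pyGetD ((List.range m).map (fun (j : Nat) => pvCnt p (j : Int))) (dc.1 - (2 * e + 1)) 0 else 0))
        = (List.range m).map (fun (j : Nat) => pvCnt (p ++ [2*e+1]) (j : Int)) := by
      rw [pvEnumerate_map_range]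
      rw [List.map_map]
      apply List.map_congr_left
      intro j hj
      have hjm : j < m := List.mem_range.mp hj
      simp only [Function.comp_apply, zero_add]
      rw [pvCnt_append_singleton]
      by_cases hge : ((j : Int) ≥ 2 * e + 1)
      · rw [if_pos hge]
        have hnn : (0:Int) ≤ (j : Int) - (2 * e + 1) := by omega
        rw [PySem.List.pyGetD_of_nonneg _ _ hnn]
        have hlt : ((j : Int) - (2 * e + 1)).toNat < m := by omega
        rw [PySem.List.getD_map_range _ _ _ _ hlt]
        congr 1
        congr 1
        omega
      · rw [if_neg hge]
        have : pvCnt p ((j : Int) - (2 * e + 1)) = 0 :=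
          pvCnt_neg p _ hp (by omega)
        omega
    rw [hstep, ih (p ++ [2*e+1])
      (fun x hx => hes x (List.mem_cons_of_mem _ hx))
      (by intro x hx
          rcases List.mem_append.mp hx with h | h
          · exact hp x h
          · simp at h; omega)]
    rw [List.append_assoc]
    rfl

-- B's value, in the same canonical form
lemma pvB_canon (N : Int) (h0 : N ≠ 0) :
    ce_cohomology_slN_alt N = (List.range (N*N).toNat).map
      (fun (j : Nat) => ((j : Int), pvCnt ((PySem.List.pyRange 1 N).map (fun e => 2*e+1)) (j : Int))) := by
  have hmpos : 1 ≤ (N*N).toNat := by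
    have := mul_self_pos.mpr h0
    omega
  have hm : (((N*N).toNat : Nat) : Int) = N * N := Int.toNat_of_nonneg (mul_self_nonneg N)
  simp only [ce_cohomology_slN_alt]
  -- initial coefficient list = pvCnt of the empty degree list
  have hc0 : (if N * N - 1 ≥ 0 then (1 : Int) :: List.replicate (N * N - 1).toNat 0 else [])
      = (List.range (N*N).toNat).map (fun (j : Nat) => pvCnt [] (j : Int)) := by
    rw [if_pos (by omega)]
    obtain ⟨m', hm'⟩ : ∃ m', (N*N).toNat = m' + 1 := ⟨(N*N).toNat - 1, by omega⟩
    have : (N * N - 1).toNat = m' := by omega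
    rw [this, hm', List.range_succ_eq_map]
    simp only [List.map_cons, List.map_map]
    have hz : ∀ j : Nat, pvCnt [] ((j + 1 : Nat) : Int) = 0 := by
      intro j
      simp only [pvCnt]
      rw [if_neg (by omega)]
    congr 1
    apply List.ext_getElem
    · simp
    · intro i h1 h2
      simp only [List.getElem_replicate, List.getElem_map, List.getElem_range,
        Function.comp_apply, Nat.succ_eq_add_one]
      exact (hz i).symm
  rw [hc0]
  have hes : ∀ e ∈ PySem.List.pyRange 1 N, 1 ≤ e := by
    intro e he
    exact (PySem.List.mem_pyRange_one.mp he).1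
  rw [pvBFold (N*N).toNat (PySem.List.pyRange 1 N) [] hes (by simp)]
  simp only [List.nil_append]
  -- {d: c for d, c in enumerate(coeffs)}: fresh distinct keys, items in order
  rw [pvEnumerate_map_range]
  have hofl : ∀ (L : List (Int × Int)), PySem.Dict.ofList L
      = L.foldl (fun acc p => acc.insert p.1 p.2) PySem.Dict.empty := fun _ => rfl
  rw [hofl]
  rw [PySem.Dict.items_foldl_insert_fresh _ Prod.fst Prod.snd _
    (fun a _ => PySem.Dict.contains_empty a.1)
    (by rw [List.map_map]
        refine List.Nodup.map ?_ (List.nodup_range)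
        intro a b hab
        simp only [Function.comp_apply] at hab
        omega)]
  have hempty : (PySem.Dict.empty : PySem.Dict Int Int).items = [] := rfl
  rw [hempty, List.nil_append, List.map_map]
  apply List.map_congr_left
  intro j _
  simp

-- ===== VERDICT (by name: the statement is the Claim_ definition above) =====
theorem ce_cohomology_slN_spec : Claim_equal_ce_cohomology_slN := by
  unfold Claim_equal_ce_cohomology_slN
  intro N _
  unfold Spec_ce_cohomology_slN
  by_cases h0 : N = 0
  · subst h0; decide
  · rw [pvA_canon N h0, pvB_canon N h0]
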